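-- pv_equiv track=rewrite | github.com/echeyne/edtechco-els | evaluation/regression_checks.py | check_ca_age_columns_emitted
-- ===== SOURCE A (Python) =====
-- from typing import Callable, Dict, List, Tuple
--
-- def check_ca_age_columns_emitted(elements: List[dict]) -> Tuple[bool, str]:
--     by_code: Dict[str, set] = {}
--     for e in elements:
--         if e.get("level") != "indicator":
--             continue
--         code = (e.get("code") or "").strip()
--         ab = (e.get("age_band") or "").strip()
--         if not code:
--             continue
--         by_code.setdefault(code, set()).add(ab)
--
--     bad = [c for c, bands in by_code.items()
--            if not (any("Early" in b for b in bands) and any("Later" in b for b in bands))]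
--     if bad:
--         return False, f"{len(bad)} indicator codes missing Early or Later: {bad[:5]}{'…' if len(bad) > 5 else ''}"
--     return True, f"all {len(by_code)} indicator codes have both Early and Later"
-- ===== SOURCE B (Python) =====
-- from typing import List, Tuple
--
-- def check_ca_age_columns_emitted(elements: List[dict]) -> Tuple[bool, str]:
--     # staged passes: flat (code, age_band) pair list, ordered-dedup codes, then nested any-scans
--     pairs = []
--     for e in elements:
--         if e.get("level") == "indicator":
--             c = (e.get("code") or "").strip()
--             if c:
--                 pairs.append((c, (e.get("age_band") or "").strip()))
--
--     codes = list(dict.fromkeys(c for c, _ in pairs))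
--
--     def has(code: str, word: str) -> bool:
--         return any(word in ab for c, ab in pairs if c == code)
--
--     bad = [c for c in codes if not (has(c, "Early") and has(c, "Later"))]
--     if not bad:
--         return True, f"all {len(codes)} indicator codes have both Early and Later"
--     return False, f"{len(bad)} indicator codes missing Early or Later: {bad[:5]}{'…' if len(bad) > 5 else ''}"
-- ===== Notes on version B (the rewrite author's own statement) =====
-- stated objective: alternative
-- what changed: A builds a dict mapping each code to a set of age bands in one pass and then rescans each set; B builds a flat (code, age_band) pair list, takes the ordered dedup of the codes, and decides each code by nested any-scans over the pair list, with no per-code dict or set at all.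
import Mathlib
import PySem

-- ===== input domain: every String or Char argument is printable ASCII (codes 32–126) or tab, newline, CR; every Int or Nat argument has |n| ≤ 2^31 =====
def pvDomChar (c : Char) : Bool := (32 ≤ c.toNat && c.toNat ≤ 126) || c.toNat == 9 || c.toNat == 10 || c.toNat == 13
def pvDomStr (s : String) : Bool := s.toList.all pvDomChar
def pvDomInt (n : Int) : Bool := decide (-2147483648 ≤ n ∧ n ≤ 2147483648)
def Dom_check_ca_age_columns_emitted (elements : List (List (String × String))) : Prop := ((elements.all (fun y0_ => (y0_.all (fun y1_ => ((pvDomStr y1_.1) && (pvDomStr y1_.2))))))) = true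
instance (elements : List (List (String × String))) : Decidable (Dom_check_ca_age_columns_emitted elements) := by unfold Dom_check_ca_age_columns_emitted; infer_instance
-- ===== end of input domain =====

-- B replaces A's dict of per-code band sets (built in one pass, rescanned afterwards) by staged
-- passes over a flat (code, age_band) pair list with an ordered dedup of the codes and nested
-- any-scans; objective: alternative decomposition, same results.

-- ===== PORT A =====
-- shared helper: e.get(k) on a dict given as an association list (first match)
def pvGet (e : List (String × String)) (k : String) : Option String :=
  (e.find? (fun p => p.1 == k)).map (·.2)

-- shared helpers: Python repr() of a str / of a list of str, as in f"{bad[:5]}"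
-- (exact on the Dom alphabet: printable ASCII plus tab/newline/CR)
def pvReprChar (q : Char) (c : Char) : List Char :=
  if c = '\\' then ['\\', '\\']
  else if c = '\t' then ['\\', 't']
  else if c = '\n' then ['\\', 'n']
  else if c = '\r' then ['\\', 'r']
  else if c = q then ['\\', q]
  else [c]

def pvReprStr (s : String) : String :=
  let q : Char := if s.toList.contains '\'' && !(s.toList.contains '"') then '"' else '\''
  String.ofList ([q] ++ s.toList.flatMap (pvReprChar q) ++ [q])

def pvReprList (xs : List String) : String :=
  "[" ++ String.intercalate ", " (xs.map pvReprStr) ++ "]"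

def check_ca_age_columns_emitted (elements : List (List (String × String))) : Bool × String :=
  let by_code : PySem.Dict String (PySem.Set String) :=
    elements.foldl (fun d e =>
      if pvGet e "level" ≠ some "indicator" then d
      else
        let code := PySem.Str.strip ((pvGet e "code").getD "")
        let ab := PySem.Str.strip ((pvGet e "age_band").getD "")
        if code = "" then d
        else d.modify code PySem.Set.empty (fun s => PySem.Set.add s ab))
      PySem.Dict.empty
  let bad : List String :=
    (by_code.items.filter (fun p =>
      !((p.2.any fun b => PySem.Str.isIn "Early" b) && (p.2.any fun b => PySem.Str.isIn "Later" b)))).map (·.1)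
  if bad ≠ [] then
    (false, PySem.Int.toStr (bad.length : Int) ++ " indicator codes missing Early or Later: "
      ++ pvReprList (PySem.List.slice bad none (some 5))
      ++ (if bad.length > 5 then "…" else ""))
  else
    (true, "all " ++ PySem.Int.toStr (by_code.size : Int) ++ " indicator codes have both Early and Later")

-- ===== PORT B =====
-- flat pass: the (code, age_band) pairs of the indicator elements with a nonempty code
def pvPairs (elements : List (List (String × String))) : List (String × String) :=
  elements.foldl (fun acc e =>
    if pvGet e "level" = some "indicator" then
      let c := PySem.Str.strip ((pvGet e "code").getD "")
      if c ≠ "" then acc ++ [(c, PySem.Str.strip ((pvGet e "age_band").getD ""))] else acc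
    else acc) []

-- helper has(code, word): any(word in ab for c, ab in pairs if c == code)
def pvHas (pairs : List (String × String)) (code word : String) : Bool :=
  pairs.any (fun q => q.1 == code && PySem.Str.isIn word q.2)

def check_ca_age_columns_emitted_alt (elements : List (List (String × String))) : Bool × String :=
  let pairs := pvPairs elements
  let codes := PySem.List.dedup (pairs.map (·.1))
  let bad := codes.filter (fun c => !(pvHas pairs c "Early" && pvHas pairs c "Later"))
  if bad = [] then
    (true, "all " ++ PySem.Int.toStr (codes.length : Int) ++ " indicator codes have both Early and Later")
  else
    (false, PySem.Int.toStr (bad.length : Int) ++ " indicator codes missing Early or Later: "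
      ++ pvReprList (PySem.List.slice bad none (some 5))
      ++ (if bad.length > 5 then "…" else ""))

-- ===== PRECONDITION & SPEC =====
def Spec_check_ca_age_columns_emitted (elements : List (List (String × String))) (out : Bool × String) : Prop := out = check_ca_age_columns_emitted_alt elements
instance (elements : List (List (String × String))) (out : Bool × String) : Decidable (Spec_check_ca_age_columns_emitted elements out) := by unfold Spec_check_ca_age_columns_emitted; infer_instance

-- ===== CLAIM (what is proved, stated in full; the proofs are below) =====
def Claim_equal_check_ca_age_columns_emitted : Prop := ∀ (elements : List (List (String × String))), Dom_check_ca_age_columns_emitted elements → Spec_check_ca_age_columns_emitted elements (check_ca_age_columns_emitted elements)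

-- ===== LEMMAS AND PROOFS =====

-- the pair an element contributes (none if it is skipped)
def pvExtract (e : List (String × String)) : Option (String × String) :=
  if pvGet e "level" ≠ some "indicator" then none
  else
    let c := PySem.Str.strip ((pvGet e "code").getD "")
    if c = "" then none
    else some (c, PySem.Str.strip ((pvGet e "age_band").getD ""))

-- A's loop body as a step on the dict, fed one extracted pair
def pvDictStep (d : PySem.Dict String (PySem.Set String)) (q : String × String) :
    PySem.Dict String (PySem.Set String) :=
  d.modify q.1 PySem.Set.empty (fun s => PySem.Set.add s q.2)

-- the dict A builds from a pair list, written as an explicit items list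
def pvItemize (ps : List (String × String)) : List (String × PySem.Set String) :=
  (PySem.Set.ofList (ps.map (·.1))).map
    (fun c => (c, PySem.Set.ofList ((ps.filter (fun q => q.1 == c)).map (·.2))))

theorem pvPairs_acc (l : List (List (String × String))) :
    ∀ acc, l.foldl (fun acc e =>
      if pvGet e "level" = some "indicator" then
        let c := PySem.Str.strip ((pvGet e "code").getD "")
        if c ≠ "" then acc ++ [(c, PySem.Str.strip ((pvGet e "age_band").getD ""))] else acc
      else acc) acc = acc ++ l.filterMap pvExtract := by
  induction l with
  | nil => intro acc; simp
  | cons e l ih =>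
    intro acc
    rw [List.foldl_cons]
    by_cases h1 : pvGet e "level" = some "indicator"
    · by_cases h2 : PySem.Str.strip ((pvGet e "code").getD "") = ""
      · have hx : pvExtract e = none := by simp [pvExtract, h1, h2]
        simp only [List.filterMap_cons, hx, h1, h2, if_true, ne_eq, not_true_eq_false, if_false]
        exact ih acc
      · have hx : pvExtract e
            = some (PySem.Str.strip ((pvGet e "code").getD ""),
                    PySem.Str.strip ((pvGet e "age_band").getD "")) := by
          simp [pvExtract, h1, h2]
        simp only [List.filterMap_cons, hx, h1, h2, ne_eq, not_false_eq_true, if_pos]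
        rw [ih]
        simp
    · have hx : pvExtract e = none := by simp [pvExtract, h1]
      simp only [List.filterMap_cons, hx, h1, if_false]
      exact ih acc

theorem pvPairs_eq_filterMap (elements : List (List (String × String))) :
    pvPairs elements = elements.filterMap pvExtract := by
  have h := pvPairs_acc elements []
  simpa [pvPairs] using h

theorem pvFoldA_eq (elements : List (List (String × String)))
    (d : PySem.Dict String (PySem.Set String)) :
    elements.foldl (fun d e =>
      if pvGet e "level" ≠ some "indicator" then d
      else
        let code := PySem.Str.strip ((pvGet e "code").getD "")
        let ab := PySem.Str.strip ((pvGet e "age_band").getD "")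
        if code = "" then d
        else d.modify code PySem.Set.empty (fun s => PySem.Set.add s ab)) d
      = (elements.filterMap pvExtract).foldl pvDictStep d := by
  induction elements generalizing d with
  | nil => rfl
  | cons e l ih =>
    rw [List.foldl_cons]
    by_cases h1 : pvGet e "level" = some "indicator"
    · by_cases h2 : PySem.Str.strip ((pvGet e "code").getD "") = ""
      · have hx : pvExtract e = none := by simp [pvExtract, h1, h2]
        simp only [List.filterMap_cons, hx, h1, h2, ne_eq, not_true_eq_false, if_false, if_true]
        exact ih _
      · have hx : pvExtract e
            = some (PySem.Str.strip ((pvGet e "code").getD ""),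
                    PySem.Str.strip ((pvGet e "age_band").getD "")) := by
          simp [pvExtract, h1, h2]
        simp only [List.filterMap_cons, hx, h1, h2, ne_eq, not_true_eq_false, if_false,
          List.foldl_cons, pvDictStep]
        exact ih _
    · have hx : pvExtract e = none := by simp [pvExtract, h1]
      simp only [List.filterMap_cons, hx, h1, ne_eq, not_false_eq_true, if_true]
      exact ih _

theorem pvOfList_append_singleton {α : Type} [BEq α] (l : List α) (x : α) :
    PySem.Set.ofList (l ++ [x]) = PySem.Set.add (PySem.Set.ofList l) x := by
  simp [PySem.Set.ofList, List.foldl_append]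

-- the key step: pushing one pair through A's dict update matches pvItemize of the extended list
theorem pvItemize_step (ps : List (String × String)) (c ab : String) :
    (pvDictStep ⟨pvItemize ps⟩ (c, ab)).items = pvItemize (ps ++ [(c, ab)]) := by
  have hkeys : (PySem.Dict.mk (pvItemize ps) : PySem.Dict String (PySem.Set String)).keys
      = PySem.Set.ofList (ps.map (·.1)) := by
    simp [PySem.Dict.keys, pvItemize, List.map_map, Function.comp_def]
  have hnd : (PySem.Dict.mk (pvItemize ps) : PySem.Dict String (PySem.Set String)).keys.Nodup := by
    rw [hkeys]; exact PySem.Set.nodup_ofList _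
  have hcont : (PySem.Dict.mk (pvItemize ps) : PySem.Dict String (PySem.Set String)).contains c
      = decide (c ∈ ps.map (·.1)) := by
    rw [PySem.Dict.contains_eq_decide_mem_keys, hkeys]
    simp [PySem.Set.mem_ofList]
  have hmaps : (ps ++ [(c, ab)]).map (·.1) = ps.map (·.1) ++ [c] := by
    simp
  simp only [pvDictStep, PySem.Dict.modify]
  by_cases hc : c ∈ ps.map (·.1)
  · -- key present: in-place rewrite on both sides
    have hcmem : c ∈ PySem.Set.ofList (ps.map (·.1)) := (PySem.Set.mem_ofList _ _).mpr hc
    have hvmem : (c, PySem.Set.ofList ((ps.filter (fun q => q.1 == c)).map (·.2)))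
        ∈ (PySem.Dict.mk (pvItemize ps) : PySem.Dict String (PySem.Set String)).items :=
      List.mem_map_of_mem hcmem
    have hgetD : (PySem.Dict.mk (pvItemize ps) : PySem.Dict String (PySem.Set String)).getD c PySem.Set.empty
        = PySem.Set.ofList ((ps.filter (fun q => q.1 == c)).map (·.2)) :=
      PySem.Dict.getD_of_mem_items _ hvmem hnd _
    rw [PySem.Dict.items_insert, hcont, if_pos (by simpa using hc), hgetD]
    have hcodes : PySem.Set.ofList ((ps ++ [(c, ab)]).map (·.1))
        = PySem.Set.ofList (ps.map (·.1)) := by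
      rw [hmaps, pvOfList_append_singleton]
      simp [PySem.Set.add, PySem.Set.contains, hc]
    simp only [pvItemize, hcodes, List.map_map]
    apply List.map_congr_left
    intro c' _
    by_cases hcc : c' = c
    · subst hcc
      have hfe : List.filter (fun q => q.1 == c') [(c', ab)] = [(c', ab)] := by simp
      simp only [Function.comp_apply, beq_self_eq_true, if_true]
      rw [List.filter_append, hfe, List.map_append]
      simp only [List.map_cons, List.map_nil]
      rw [pvOfList_append_singleton]
    · have hne : (c' == c) = false := by simpa using hcc
      have hfn : List.filter (fun q => q.1 == c') [(c, ab)] = [] := by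
        simp [Ne.symm hcc]
      simp only [Function.comp_apply, hne]
      rw [List.filter_append, hfn]
      simp
  · -- fresh key: both sides append at the end
    rw [PySem.Dict.items_insert, hcont, if_neg (by simpa using hc)]
    have hgetD : (PySem.Dict.mk (pvItemize ps) : PySem.Dict String (PySem.Set String)).getD c PySem.Set.empty
        = PySem.Set.empty := by
      apply PySem.Dict.getD_of_not_contains
      rw [hcont]; simpa using hc
    rw [hgetD]
    have hfilter_nil : ps.filter (fun q => q.1 == c) = [] := by
      apply List.filter_eq_nil_iff.mpr
      intro q hq hq1
      have hq1' : q.1 = c := by simpa using hq1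
      exact hc (hq1' ▸ List.mem_map_of_mem hq)
    have hadd : PySem.Set.add (PySem.Set.ofList (ps.map (·.1))) c
        = PySem.Set.ofList (ps.map (·.1)) ++ [c] := by
      simp only [PySem.Set.add, PySem.Set.contains]
      rw [if_neg (by simp [PySem.Set.mem_ofList, hc])]
    simp only [pvItemize]
    rw [hmaps, pvOfList_append_singleton, hadd, List.map_append]
    congr 1
    · apply List.map_congr_left
      intro c' hc'
      have hne : c' ≠ c := by
        rintro rfl; exact hc ((PySem.Set.mem_ofList _ _).mp hc')
      have hfn : List.filter (fun q => q.1 == c') [(c, ab)] = [] := by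
        simp [Ne.symm hne]
      rw [List.filter_append, hfn]
      simp
    · rw [List.map_cons, List.map_nil, List.filter_append, hfilter_nil]
      simp [PySem.Set.ofList, PySem.Set.add, PySem.Set.empty, PySem.Set.contains]

theorem pvFold_itemize (ps : List (String × String)) :
    (ps.foldl pvDictStep PySem.Dict.empty).items = pvItemize ps := by
  induction ps using List.reverseRecOn with
  | nil => simp [PySem.Dict.empty, pvItemize, PySem.Set.ofList, PySem.Set.empty]
  | append_singleton ps q ih =>
    rw [List.foldl_append, List.foldl_cons, List.foldl_nil]
    have : ps.foldl pvDictStep PySem.Dict.empty = ⟨pvItemize ps⟩ := by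
      cases h : ps.foldl pvDictStep PySem.Dict.empty with
      | mk items => simpa [h] using ih
    rw [this]
    obtain ⟨c, ab⟩ := q
    exact pvItemize_step ps c ab

theorem pvAny_ofList {α : Type} [BEq α] [LawfulBEq α] (l : List α) (p : α → Bool) :
    (PySem.Set.ofList l).any p = l.any p := by
  rw [Bool.eq_iff_iff]
  simp only [List.any_eq_true]
  constructor
  · rintro ⟨x, hx, hp⟩; exact ⟨x, (PySem.Set.mem_ofList _ _).mp hx, hp⟩
  · rintro ⟨x, hx, hp⟩; exact ⟨x, (PySem.Set.mem_ofList _ _).mpr hx, hp⟩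

-- B's nested any-scan computes A's any over the code's band set
theorem pvHas_eq_set_any (ps : List (String × String)) (c word : String) :
    pvHas ps c word
      = (PySem.Set.ofList ((ps.filter (fun q => q.1 == c)).map (·.2))).any
          (fun b => PySem.Str.isIn word b) := by
  rw [pvHas, pvAny_ofList, List.any_map, List.any_filter]
  rfl

-- both ports compute the same 'bad' list and the same code count
theorem pvBad_eq (ps : List (String × String)) :
    ((pvItemize ps).filter (fun p =>
        !((p.2.any fun b => PySem.Str.isIn "Early" b) && (p.2.any fun b => PySem.Str.isIn "Later" b)))).map (·.1)
      = (PySem.List.dedup (ps.map (·.1))).filter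
          (fun c => !(pvHas ps c "Early" && pvHas ps c "Later")) := by
  simp only [pvItemize, PySem.List.dedup, List.filter_map, List.map_map]
  have : ∀ c : String,
      ((fun p : String × PySem.Set String =>
          !((p.2.any fun b => PySem.Str.isIn "Early" b) && (p.2.any fun b => PySem.Str.isIn "Later" b))) ∘
        (fun c => (c, PySem.Set.ofList ((ps.filter (fun q => q.1 == c)).map (·.2))))) c
      = !(pvHas ps c "Early" && pvHas ps c "Later") := by
    intro c
    simp only [Function.comp_apply, pvHas_eq_set_any]
  rw [List.filter_congr (fun c _ => this c)]
  simp [Function.comp_def]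

theorem check_ca_age_columns_emitted_eq (elements : List (List (String × String))) :
    check_ca_age_columns_emitted elements = check_ca_age_columns_emitted_alt elements := by
  unfold check_ca_age_columns_emitted check_ca_age_columns_emitted_alt
  rw [pvFoldA_eq, pvPairs_eq_filterMap]
  set ps := elements.filterMap pvExtract with hps
  have hitems : (ps.foldl pvDictStep PySem.Dict.empty).items = pvItemize ps := pvFold_itemize ps
  have hfold : elements.filterMap pvExtract = ps := rfl
  simp only [PySem.Dict.size, hitems, pvBad_eq]
  have hlen : (pvItemize ps).length = (PySem.List.dedup (ps.map (·.1))).length := by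
    simp [pvItemize, PySem.List.dedup]
  rw [hlen]
  by_cases hbad : (PySem.List.dedup (ps.map (·.1))).filter
      (fun c => !(pvHas ps c "Early" && pvHas ps c "Later")) = []
  · simp only [hbad]
    simp
  · rw [if_pos hbad, if_neg hbad]

-- ===== VERDICT (by name: the statement is the Claim_ definition above) =====
theorem check_ca_age_columns_emitted_spec : Claim_equal_check_ca_age_columns_emitted := by
  intro elements _
  exact check_ca_age_columns_emitted_eq elements
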